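-- pv_equiv track=rewrite | github.com/RoboFinSystems/robosystems | robosystems/processors/qb_transactions.py | qb_stripped_account_name
-- ===== SOURCE A (Python) =====
-- def qb_stripped_account_name(acct_name):
--   acct_name = acct_name.title()
--   acct_name = acct_name.replace(" ", "")
--   acct_name = acct_name.split("(")[0].strip()
--   symbol_list = [
--     "&",
--     "(",
--     ")",
--     ".",
--     ",",
--     ":",
--     ";",
--     "!",
--     "?",
--     "/",
--     "\\",
--     "|",
--     "+",
--     "=",
--     "*",
--     "@",
--     "#",
--     "$",
--     "%",
--     "^",
--     "<",
--     ">",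
--     "~",
--     "`",
--   ]
--   for symbol in symbol_list:
--     acct_name = acct_name.replace(symbol, "")
--
--   return acct_name
-- ===== SOURCE B (Python) =====
-- SYMBOLS = frozenset("&().,:;!?/\\|+=*@#$%^<>~`")
--
-- def qb_stripped_account_name(acct_name):
--   # One fused pass: title-case each char, drop spaces, stop at the first '('
--   # (equivalent to A's staged title / replace(" ","") / split("(")[0]).
--   out = []
--   prev_alpha = False
--   for c in acct_name:
--     if c == '(':
--       break
--     if c.isalpha():
--       out.append(c.lower() if prev_alpha else c.upper())
--       prev_alpha = True
--     else:
--       if c != ' ':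
--         out.append(c)
--       prev_alpha = False
--   head = ''.join(out).strip()
--   return ''.join(c for c in head if c not in SYMBOLS)
-- ===== Notes on version B (the rewrite author's own statement) =====
-- stated objective: alternative
-- what changed: A's three staged string passes (title, replace-spaces, split-at-paren) are fused into one character-level loop with a prev-alpha casing state that also truncates at '(', and the 24 str.replace passes become a single filter against a symbol set built once.
import Mathlib
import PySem

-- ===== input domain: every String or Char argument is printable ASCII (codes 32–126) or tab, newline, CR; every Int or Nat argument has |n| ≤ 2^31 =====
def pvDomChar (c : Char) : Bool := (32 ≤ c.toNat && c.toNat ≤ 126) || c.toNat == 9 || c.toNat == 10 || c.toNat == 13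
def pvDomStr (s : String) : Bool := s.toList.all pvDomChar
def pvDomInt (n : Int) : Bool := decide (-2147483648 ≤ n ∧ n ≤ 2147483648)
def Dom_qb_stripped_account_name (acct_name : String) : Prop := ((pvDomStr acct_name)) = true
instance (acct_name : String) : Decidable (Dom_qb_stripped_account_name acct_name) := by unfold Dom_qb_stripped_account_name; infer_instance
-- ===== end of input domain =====

-- B fuses A's three staged passes (title-case, remove spaces, split at '(') into one
-- character-level recursion with a prev-alpha state, then strips and filters against a
-- symbol set built once instead of running 24 str.replace passes (alternative; same result).

-- ===== PORT A =====
-- hand port of Python str.title(): exact on the ASCII domain, where the cased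
-- characters are exactly the letters; a letter is uppercased after a non-letter,
-- lowercased after a letter.
def pvTitleGo (prevCased : Bool) : List Char → List Char
  | [] => []
  | c :: t =>
    if PySem.Chars.isalpha c then
      (if prevCased then PySem.Chars.lowerChar c else PySem.Chars.upperChar c) :: pvTitleGo true t
    else c :: pvTitleGo false t

-- the 24 one-character symbol strings of A's symbol_list, in order
def pvSymbolList : List Char :=
  ['&', '(', ')', '.', ',', ':', ';', '!', '?', '/', '\\', '|',
   '+', '=', '*', '@', '#', '$', '%', '^', '<', '>', '~', '`']

def qb_stripped_account_name (acct_name : String) : String :=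
  let s1 := pvTitleGo false acct_name.toList
  let s2 := PySem.Chars.replace s1 [' '] []
  let s3 := PySem.Chars.strip ((PySem.Chars.splitOn s2 ['(']).headD [])
  String.ofList (pvSymbolList.foldl (fun acc sym => PySem.Chars.replace acc [sym] []) s3)

-- ===== PORT B =====
-- B's frozenset of the 24 symbols, built once from the literal string
def pvBSymbols : PySem.Set Char := PySem.Set.ofList "&().,:;!?/\\|+=*@#$%^<>~`".toList

-- B's fused loop: title-case (prev-alpha state), drop spaces, break at the first '('
def pvFusedScan (prevAlpha : Bool) : List Char → List Char
  | [] => []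
  | c :: t =>
    if c = '(' then []
    else if PySem.Chars.isalpha c then
      (if prevAlpha then PySem.Chars.lowerChar c else PySem.Chars.upperChar c) :: pvFusedScan true t
    else if c = ' ' then pvFusedScan false t
    else c :: pvFusedScan false t

def qb_stripped_account_name_alt (acct_name : String) : String :=
  let head := PySem.Chars.strip (pvFusedScan false acct_name.toList)
  String.ofList (head.filter (fun c => !(pvBSymbols.contains c)))

-- ===== PRECONDITION & SPEC =====
def Spec_qb_stripped_account_name (acct_name : String) (out : String) : Prop := out = qb_stripped_account_name_alt acct_name
instance (acct_name : String) (out : String) : Decidable (Spec_qb_stripped_account_name acct_name out) := by unfold Spec_qb_stripped_account_name; infer_instance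

-- ===== CLAIM (what is proved, stated in full; the proofs are below) =====
def Claim_equal_qb_stripped_account_name : Prop := ∀ (acct_name : String), Dom_qb_stripped_account_name acct_name → Spec_qb_stripped_account_name acct_name (qb_stripped_account_name acct_name)

-- ===== LEMMAS AND PROOFS =====

-- replace with a single-character pattern and empty replacement is a filter
theorem pv_replace_go_single (c : Char) : ∀ (l : List Char) (fuel : Nat) (acc : List Char),
    l.length ≤ fuel →
    PySem.Chars.replace.go [c] [] fuel l acc = acc.reverse ++ l.filter (fun x => x != c) := by
  intro l
  induction l with
  | nil => intro fuel acc _; cases fuel <;> simp [PySem.Chars.replace.go]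
  | cons h t ih =>
    intro fuel acc hfuel
    cases fuel with
    | zero => simp at hfuel
    | succ n =>
      simp only [PySem.Chars.replace.go, List.isPrefixOf, List.filter]
      by_cases hc : c = h
      · subst hc
        simp only [beq_self_eq_true, Bool.true_and, if_pos]
        have h1 : List.drop [c].length (c :: t) = t := rfl
        have h2 : ([] : List Char).reverse ++ acc = acc := rfl
        rw [h1, h2, ih n acc (by simpa using hfuel)]
        simp
      · have hbe : (c == h) = false := by simpa using hc
        have hne : (h != c) = true := by simp [bne]; exact fun e => hc e.symm
        simp only [hbe, Bool.false_and, if_neg Bool.false_ne_true, hne]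
        rw [ih n (h :: acc) (by simpa using hfuel)]
        simp

theorem pv_replace_single (c : Char) (cs : List Char) :
    PySem.Chars.replace cs [c] [] = cs.filter (fun x => x != c) := by
  have := pv_replace_go_single c cs cs.length []
  simpa [PySem.Chars.replace] using this

-- folding single-character filters over a symbol list is one filter against the list
theorem pv_foldl_filter : ∀ (syms : List Char) (cs : List Char),
    syms.foldl (fun acc sym => List.filter (fun x => x != sym) acc) cs
      = cs.filter (fun x => !syms.contains x) := by
  intro syms
  induction syms with
  | nil => intro cs; simp
  | cons y t ih =>
    intro cs
    simp only [List.foldl_cons]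
    rw [ih, List.filter_filter]
    apply List.filter_congr
    intro x _
    simp only [bne, List.contains_cons, Bool.not_or]
    by_cases hxy : x = y <;> by_cases hxt : x ∈ t <;> simp [hxy, hxt]

theorem pv_bsymbols_eq : pvBSymbols = pvSymbolList := by decide

-- the first piece of splitOn with a single-character separator is takeWhile
theorem pv_splitOn_go_first (sep : Char) : ∀ (l : List Char) (fuel : Nat) (cur : List Char) (acc : List (List Char)),
    l.length ≤ fuel →
    ∃ tail, PySem.Chars.splitOn.go [sep] fuel l cur acc
      = acc.reverse ++ ((cur.reverse ++ l.takeWhile (fun x => x != sep)) :: tail) := by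
  intro l
  induction l with
  | nil =>
    intro fuel cur acc _
    cases fuel <;> exact ⟨[], by simp [PySem.Chars.splitOn.go]⟩
  | cons c t ih =>
    intro fuel cur acc hfuel
    cases fuel with
    | zero => simp at hfuel
    | succ n =>
      simp only [PySem.Chars.splitOn.go, List.isPrefixOf, List.takeWhile]
      by_cases hc : sep = c
      · subst hc
        simp only [beq_self_eq_true, Bool.true_and, if_pos, bne_self_eq_false]
        obtain ⟨tail, htail⟩ := ih n [] (cur.reverse :: acc) (by simpa using hfuel)
        refine ⟨List.takeWhile (fun x => x != sep) t :: tail, ?_⟩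
        have hd : List.drop [sep].length (sep :: t) = t := rfl
        rw [hd, htail]
        simp
      · have hbe : (sep == c) = false := by simpa using hc
        have hne : (c != sep) = true := by simp [bne]; exact fun e => hc e.symm
        simp only [hbe, Bool.false_and, if_neg Bool.false_ne_true, hne]
        obtain ⟨tail, htail⟩ := ih n (c :: cur) acc (by simpa using hfuel)
        exact ⟨tail, by simpa using htail⟩

theorem pv_splitOn_head (sep : Char) (s : List Char) :
    (PySem.Chars.splitOn s [sep]).headD [] = s.takeWhile (fun x => x != sep) := by
  obtain ⟨tail, htail⟩ := pv_splitOn_go_first sep s (s.length + 1) [] [] (by omega)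
  simp [PySem.Chars.splitOn, htail]

-- filtering a character that is not the break character commutes with takeWhile
theorem pv_filter_takeWhile (s : List Char) :
    List.filter (fun x => x != ' ') (List.takeWhile (fun x => x != '(') s)
      = List.takeWhile (fun x => x != '(') (List.filter (fun x => x != ' ') s) := by
  induction s with
  | nil => rfl
  | cons c t ih =>
    by_cases h1 : c = '('
    · subst h1; simp [List.takeWhile, List.filter]
    · by_cases h2 : c = ' '
      · subst h2; simp [List.takeWhile, List.filter, ih]
      · have hb1 : (c != '(') = true := by simp [h1]
        have hb2 : (c != ' ') = true := by simp [h2]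
        simp [List.takeWhile, List.filter, hb1, hb2, ih]

-- titled letters are neither '(' nor ' '
theorem pv_title_toNat_ge (c : Char) (h : PySem.Chars.isalpha c = true) :
    65 ≤ (PySem.Chars.lowerChar c).toNat ∧ 65 ≤ (PySem.Chars.upperChar c).toNat := by
  have hval : ∀ n : Nat, n ≤ 122 → (Char.ofNat n).toNat = n := by
    intro n hn
    rw [Char.toNat_ofNat, if_pos]
    exact Or.inl (by omega)
  simp only [PySem.Chars.isalpha, PySem.Chars.isupper, PySem.Chars.islower, Bool.or_eq_true,
    Bool.and_eq_true, decide_eq_true_eq, Char.le_def, UInt32.le_iff_toNat_le] at h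
  have hb : 65 ≤ c.toNat ∧ c.toNat ≤ 90 ∨ 97 ≤ c.toNat ∧ c.toNat ≤ 122 := by simpa using h
  constructor
  · unfold PySem.Chars.lowerChar PySem.Chars.isupper
    split_ifs with hif
    · simp only [Bool.and_eq_true, decide_eq_true_eq, Char.le_def, UInt32.le_iff_toNat_le] at hif
      have hif' : 65 ≤ c.toNat ∧ c.toNat ≤ 90 := by simpa using hif
      rw [hval _ (by omega)]; omega
    · omega
  · unfold PySem.Chars.upperChar PySem.Chars.islower
    split_ifs with hif
    · simp only [Bool.and_eq_true, decide_eq_true_eq, Char.le_def, UInt32.le_iff_toNat_le] at hif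
      have hif' : 97 ≤ c.toNat ∧ c.toNat ≤ 122 := by simpa using hif
      rw [hval _ (by omega)]; omega
    · have hif' : ¬(97 ≤ c.toNat ∧ c.toNat ≤ 122) := by
        intro hcon
        refine hif ?_
        simp only [Bool.and_eq_true, decide_eq_true_eq, Char.le_def, UInt32.le_iff_toNat_le]
        simpa using hcon
      omega

theorem pv_titleChar_ne (c : Char) (h : PySem.Chars.isalpha c = true) (b : Bool) :
    ((if b then PySem.Chars.lowerChar c else PySem.Chars.upperChar c) != '(')  = true ∧
    ((if b then PySem.Chars.lowerChar c else PySem.Chars.upperChar c) != ' ') = true := by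
  obtain ⟨h1, h2⟩ := pv_title_toNat_ge c h
  constructor <;> cases b <;> simp only [if_true, bne_iff_ne] <;>
    intro heq <;> have ht := congrArg Char.toNat heq <;> simp only [] at ht <;>
    rw [ht] at * <;> simp_all

-- B's fused scan is A's three staged passes
theorem pv_fusedScan_eq : ∀ (s : List Char) (b : Bool),
    pvFusedScan b s
      = List.takeWhile (fun x => x != '(')
          (List.filter (fun x => x != ' ') (pvTitleGo b s)) := by
  intro s
  induction s with
  | nil => intro b; rfl
  | cons c t ih =>
    intro b
    by_cases h1 : c = '('
    · subst h1
      simp [pvFusedScan, pvTitleGo, List.filter, List.takeWhile, show PySem.Chars.isalpha '(' = false by decide]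
    · by_cases ha : PySem.Chars.isalpha c = true
      · obtain ⟨hp, hs⟩ := pv_titleChar_ne c ha b
        simp [pvFusedScan, pvTitleGo, h1, ha, List.filter, List.takeWhile, hp, hs, ih]
      · by_cases h2 : c = ' '
        · subst h2
          simp [pvFusedScan, pvTitleGo, ha, List.filter, ih]
        · simp [pvFusedScan, pvTitleGo, h1, h2, ha, List.filter, List.takeWhile, ih]

-- ===== VERDICT (by name: the statement is the Claim_ definition above) =====
theorem qb_stripped_account_name_spec : Claim_equal_qb_stripped_account_name := by
  intro acct_name _
  unfold Spec_qb_stripped_account_name qb_stripped_account_name qb_stripped_account_name_alt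
  simp only [pv_foldl_filter, pv_bsymbols_eq, pv_replace_single, pv_splitOn_head,
    pv_fusedScan_eq, pv_filter_takeWhile, PySem.Set.contains_eq_listContains]
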